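-- pv_equiv track=rewrite | github.com/otherland/python-challenges | evolving_code_naive.py | get_sequence_index
-- ===== SOURCE A (Python) =====
-- def get_sequence_index(sequence, string_index, separator):
--     """
--     Elements in sequence are joined by separator to create a string.
--     string_index refers to an index in the string.
--     Find the element in the original sequenceay that corresponds to the string_index.
--
--     sequence = ['def', 'x', '?']
--     separator = " "
--     string = separator.join(sequence) >>> "def x ?"
--     string_index = 6
--     string[string_index] >>> "?"
--     get_sequence_index(sequence, string_index, separator) >>> 2
--     """
--     count = 0
--     string_index += 1
--     sep = len(separator)
--     for index, token in enumerate(sequence):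
--         size = len(token) + sep
--         if count + size >= string_index:
--             # found token
--             return index
--         count += size
--     raise Exception('Failed to get sequence index.')
-- ===== SOURCE B (Python) =====
-- def get_sequence_index(sequence, string_index, separator):
--     # Build a prefix-sum table of cumulative joined sizes, then binary-search
--     # for the first entry reaching string_index + 1.
--     sep = len(separator)
--     prefix = []
--     total = 0
--     for token in sequence:
--         total += len(token) + sep
--         prefix.append(total)
--     target = string_index + 1
--     lo, hi = 0, len(prefix)
--     while lo < hi:
--         mid = (lo + hi) // 2
--         if prefix[mid] < target:
--             lo = mid + 1
--         else:
--             hi = mid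
--     if lo == len(sequence):
--         raise Exception('Failed to get sequence index.')
--     return lo
-- ===== Notes on version B (the rewrite author's own statement) =====
-- stated objective: alternative
-- what changed: Replaces A's single accumulate-and-test linear scan with building a prefix-sum table of cumulative token+separator sizes and then binary-searching it for the first entry reaching string_index+1.
import Mathlib
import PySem

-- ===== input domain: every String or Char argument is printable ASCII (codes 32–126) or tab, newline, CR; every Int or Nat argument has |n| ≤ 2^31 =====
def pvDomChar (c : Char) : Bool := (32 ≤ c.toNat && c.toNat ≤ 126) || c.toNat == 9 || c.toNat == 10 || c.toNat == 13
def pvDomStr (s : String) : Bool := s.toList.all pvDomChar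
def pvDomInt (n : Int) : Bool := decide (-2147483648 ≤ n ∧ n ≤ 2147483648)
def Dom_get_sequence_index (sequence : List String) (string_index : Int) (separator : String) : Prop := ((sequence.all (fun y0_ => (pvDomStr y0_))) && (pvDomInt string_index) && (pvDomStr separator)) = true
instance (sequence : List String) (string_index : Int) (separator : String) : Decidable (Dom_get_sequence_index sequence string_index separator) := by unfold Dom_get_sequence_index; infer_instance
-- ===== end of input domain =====

-- B replaces A's linear accumulate-and-test scan with a prefix-sum table plus binary search (alternative decomposition; equivalence of the RETURN value on Pre_).

-- ===== PORT A =====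
-- the for-loop of A: carries (index, count); returns -1 where Python raises (excluded by Pre_)
def pvA_loop (seq : List String) (idx : Int) (count : Int) (si : Int) (sep : Int) : Int :=
  match seq with
  | [] => -1
  | t :: rest =>
    let size := PySem.Str.len t + sep
    if si ≤ count + size then idx
    else pvA_loop rest (idx + 1) (count + size) si sep

def get_sequence_index (sequence : List String) (string_index : Int) (separator : String) : Int :=
  pvA_loop sequence 0 0 (string_index + 1) (PySem.Str.len separator)

-- ===== PORT B =====
-- prefix-sum table: cumulative sizes starting from `total`
def pvB_prefix (seq : List String) (sep : Int) (total : Int) : List Int :=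
  match seq with
  | [] => []
  | t :: rest =>
    let total' := total + PySem.Str.len t + sep
    total' :: pvB_prefix rest sep total'

-- the while-loop binary search of B
def pvB_search (pre : List Int) (target : Int) (lo hi : Nat) : Nat :=
  if _h : lo < hi then
    let mid := (lo + hi) / 2
    if pre.getD mid 0 < target then pvB_search pre target (mid + 1) hi
    else pvB_search pre target lo mid
  else lo
termination_by hi - lo
decreasing_by all_goals omega

def get_sequence_index_alt (sequence : List String) (string_index : Int) (separator : String) : Int :=
  let pre := pvB_prefix sequence (PySem.Str.len separator) 0
  let lo := pvB_search pre (string_index + 1) 0 pre.length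
  if lo = sequence.length then -1 else (lo : Int)

-- ===== PRECONDITION & SPEC =====
-- Pre_ excludes exactly the inputs on which A raises Exception ('Failed to get
-- sequence index'): the empty sequence, and string_index+1 exceeding the total
-- joined size; B raises there too.
def Pre_get_sequence_index (sequence : List String) (string_index : Int) (separator : String) : Prop :=
  sequence ≠ [] ∧
  string_index + 1 ≤ sequence.foldl (fun acc t => acc + PySem.Str.len t + PySem.Str.len separator) 0

instance (sequence : List String) (string_index : Int) (separator : String) : Decidable (Pre_get_sequence_index sequence string_index separator) := by unfold Pre_get_sequence_index; infer_instance

def pvWitness_get_sequence_index : List String × Int × String := (["def", "x", "?"], 6, " ")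

def Spec_get_sequence_index (sequence : List String) (string_index : Int) (separator : String) (out : Int) : Prop := out = get_sequence_index_alt sequence string_index separator
instance (sequence : List String) (string_index : Int) (separator : String) (out : Int) : Decidable (Spec_get_sequence_index sequence string_index separator out) := by unfold Spec_get_sequence_index; infer_instance

-- ===== CLAIM (what is proved, stated in full; the proofs are below) =====
def Claim_equal_get_sequence_index : Prop := ∀ (sequence : List String) (string_index : Int) (separator : String), Dom_get_sequence_index sequence string_index separator → Pre_get_sequence_index sequence string_index separator → Spec_get_sequence_index sequence string_index separator (get_sequence_index sequence string_index separator)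

-- ===== LEMMAS AND PROOFS =====

theorem pvStrLen_nonneg (s : String) : 0 ≤ PySem.Str.len s := by
  simp

theorem pvB_prefix_length (seq : List String) (sep total : Int) :
    (pvB_prefix seq sep total).length = seq.length := by
  induction seq generalizing total with
  | nil => simp [pvB_prefix]
  | cons t rest ih => simp [pvB_prefix, ih]

-- every entry of the prefix table is ≥ the starting total (sizes are nonneg when 0 ≤ sep)
theorem pvB_prefix_lb (seq : List String) (sep total : Int) (hsep : 0 ≤ sep) :
    ∀ x ∈ pvB_prefix seq sep total, total ≤ x := by
  induction seq generalizing total with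
  | nil => simp [pvB_prefix]
  | cons t rest ih =>
    intro x hx
    simp only [pvB_prefix, List.mem_cons] at hx
    have hlt : total ≤ total + PySem.Str.len t + sep := by
      have := pvStrLen_nonneg t; omega
    rcases hx with rfl | hx
    · exact hlt
    · exact le_trans hlt (ih _ x hx)

-- the prefix table is monotone (under getD)
theorem pvB_prefix_mono (seq : List String) (sep total : Int) (hsep : 0 ≤ sep) :
    ∀ i j : Nat, i ≤ j → j < (pvB_prefix seq sep total).length →
      (pvB_prefix seq sep total).getD i 0 ≤ (pvB_prefix seq sep total).getD j 0 := by
  induction seq generalizing total with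
  | nil => intro i j _ hj; simp [pvB_prefix] at hj
  | cons t rest ih =>
    intro i j hij hj
    simp only [pvB_prefix, List.length_cons] at hj ⊢
    cases i with
    | zero =>
      cases j with
      | zero => simp
      | succ j =>
        simp only [List.getD_cons_zero, List.getD_cons_succ]
        have hjl : j < (pvB_prefix rest sep (total + PySem.Str.len t + sep)).length := by omega
        rw [List.getD_eq_getElem _ _ hjl]
        exact pvB_prefix_lb rest sep _ hsep _ (List.getElem_mem hjl)
    | succ i =>
      cases j with
      | zero => omega
      | succ j =>
        simp only [List.getD_cons_succ]
        exact ih _ i j (by omega) (by omega)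

-- last entry of the prefix table = the foldl total
theorem pvB_prefix_last (seq : List String) (sep total : Int) (hne : seq ≠ []) :
    (pvB_prefix seq sep total).getD (seq.length - 1) 0 =
      seq.foldl (fun acc t => acc + PySem.Str.len t + sep) total := by
  induction seq generalizing total with
  | nil => simp at hne
  | cons t rest ih =>
    cases rest with
    | nil => simp [pvB_prefix]
    | cons u rs =>
      simp only [pvB_prefix, List.length_cons, List.foldl_cons]
      have h := ih (total + PySem.Str.len t + sep) (by simp)
      simpa using h

-- A's loop characterised against the prefix table
theorem pvA_loop_char (seq : List String) (si sep : Int) :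
    ∀ (idx count : Int),
      (∃ k : Nat, k < (pvB_prefix seq sep count).length ∧ si ≤ (pvB_prefix seq sep count).getD k 0) →
      ∃ j : Nat, pvA_loop seq idx count si sep = idx + (j : Int) ∧
        j < (pvB_prefix seq sep count).length ∧
        si ≤ (pvB_prefix seq sep count).getD j 0 ∧
        ∀ i : Nat, i < j → (pvB_prefix seq sep count).getD i 0 < si := by
  induction seq with
  | nil => intro idx count ⟨k, hk, _⟩; simp [pvB_prefix] at hk
  | cons t rest ih =>
    intro idx count ⟨k, hk, hsik⟩
    simp only [pvB_prefix, List.length_cons] at hk hsik ⊢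
    by_cases hhit : si ≤ count + (PySem.Str.len t + sep)
    · refine ⟨0, ?_, by omega, ?_, by omega⟩
      · simp only [pvA_loop, if_pos hhit]; omega
      · simp only [List.getD_cons_zero]; omega
    · have hk' : ∃ k' : Nat, k' < (pvB_prefix rest sep (count + PySem.Str.len t + sep)).length ∧
          si ≤ (pvB_prefix rest sep (count + PySem.Str.len t + sep)).getD k' 0 := by
        cases k with
        | zero => simp only [List.getD_cons_zero] at hsik; omega
        | succ k => exact ⟨k, by omega, by simpa using hsik⟩
      obtain ⟨j, hjeq, hjl, hjsi, hjmin⟩ := ih (idx + 1) (count + PySem.Str.len t + sep) hk'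
      refine ⟨j + 1, ?_, by omega, by simpa using hjsi, ?_⟩
      · simp only [pvA_loop, if_neg hhit]
        have : count + (PySem.Str.len t + sep) = count + PySem.Str.len t + sep := by ring
        rw [this, hjeq]; push_cast; ring
      · intro i hi
        cases i with
        | zero => simp only [List.getD_cons_zero]; omega
        | succ i => simpa using hjmin i (by omega)

-- binary-search correctness on a monotone table
theorem pvB_search_char (pre : List Int) (target : Int)
    (hmono : ∀ i j : Nat, i ≤ j → j < pre.length → pre.getD i 0 ≤ pre.getD j 0) :
    ∀ lo hi : Nat, lo ≤ hi → hi ≤ pre.length →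
      (∀ i : Nat, i < lo → pre.getD i 0 < target) →
      (∀ i : Nat, hi ≤ i → i < pre.length → target ≤ pre.getD i 0) →
      (∀ i : Nat, i < pvB_search pre target lo hi → pre.getD i 0 < target) ∧
      (pvB_search pre target lo hi < pre.length → target ≤ pre.getD (pvB_search pre target lo hi) 0) ∧
      pvB_search pre target lo hi ≤ pre.length := by
  intro lo hi
  induction lo, hi using pvB_search.induct pre target with
  | case1 lo hi h mid hlt ih =>
    intro hlohi hhile hbelow habove
    rw [pvB_search, dif_pos h, if_pos hlt]
    refine ih (by omega) (by omega) ?_ habove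
    intro i hi'
    have : pre.getD i 0 ≤ pre.getD mid 0 := by
      by_cases hil : i ≤ mid
      · by_cases hm : mid < pre.length
        · exact hmono i mid hil hm
        · -- mid ≥ pre.length: then i could equal mid… but i < mid+1 and i ≤ mid; if i = mid it's the same
          by_cases him : i = mid
          · simp [him]
          · have : pre.getD mid 0 = 0 := List.getD_eq_default _ _ (by omega)
            have h2 : pre.getD i 0 = 0 := List.getD_eq_default _ _ (by omega)
            omega
      · omega
    omega
  | case2 lo hi h mid hge ih =>
    intro hlohi hhile hbelow habove
    rw [pvB_search, dif_pos h, if_neg hge]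
    refine ih (by omega) (by omega) hbelow ?_
    intro i hmidi hil
    have : pre.getD mid 0 ≤ pre.getD i 0 := hmono mid i hmidi hil
    omega
  | case3 lo hi h =>
    intro hlohi hhile hbelow habove
    rw [pvB_search, dif_neg h]
    exact ⟨hbelow, fun hl => habove lo (by omega) hl, by omega⟩

-- ===== VERDICT (by name: the statement is the Claim_ definition above) =====
theorem get_sequence_index_spec : Claim_equal_get_sequence_index := by
  intro sequence string_index separator _hdom hpre
  unfold Spec_get_sequence_index
  obtain ⟨hne, htot⟩ := hpre
  set sep := PySem.Str.len separator with hsepdef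
  have hsep : 0 ≤ sep := pvStrLen_nonneg separator
  set si := string_index + 1 with hsidef
  set pre := pvB_prefix sequence sep 0 with hpredef
  have hlen : pre.length = sequence.length := pvB_prefix_length _ _ _
  have hlenpos : 0 < sequence.length := List.length_pos_of_ne_nil hne
  -- existence of an index reaching si
  have hex : ∃ k : Nat, k < pre.length ∧ si ≤ pre.getD k 0 := by
    refine ⟨sequence.length - 1, by omega, ?_⟩
    rw [hpredef, pvB_prefix_last sequence sep 0 hne]
    exact htot
  -- characterise A
  obtain ⟨j, hjeq, hjl, hjsi, hjmin⟩ := pvA_loop_char sequence si sep 0 0 hex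
  clear hex
  rw [← hpredef] at hjl hjsi hjmin
  -- characterise B
  have hmono := pvB_prefix_mono sequence sep 0 hsep
  rw [← hpredef] at hmono
  obtain ⟨hbelow, habove, hle⟩ := pvB_search_char pre si hmono 0 pre.length
    (by omega) (le_refl _) (by omega) (by omega)
  set r := pvB_search pre si 0 pre.length with hrdef
  -- r = j (both are the least index whose prefix sum reaches si)
  have hrj : r = j := by
    by_cases hlt : r < j
    · exact absurd (habove (by omega)) (by have := hjmin r hlt; omega)
    · by_cases hgt : j < r
      · exact absurd hjsi (by have := hbelow j hgt; omega)
      · omega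
  have hrlen : r ≠ sequence.length := by omega
  have hB : get_sequence_index_alt sequence string_index separator = (r : Int) := by
    simp only [get_sequence_index_alt]
    rw [← hsepdef, ← hsidef, ← hpredef, ← hrdef, if_neg hrlen]
  have hA : get_sequence_index sequence string_index separator = (j : Int) := by
    simp only [get_sequence_index]
    rw [← hsepdef, ← hsidef]
    simpa using hjeq
  rw [hA, hB, hrj]
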